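-- pv_equiv track=rewrite | github.com/XavierPlayzTheDueldox/Python_Lvl2 | .vscode/Lists/ex121.py | countRange
-- ===== SOURCE A (Python) =====
-- def countRange(max, min, numberslist):
--     numberslist = sorted(numberslist)
--     extra = list()
--     for i in range(len(numberslist)):
--         if numberslist[i] <= min:
--             extra.append(numberslist[i])
--         elif numberslist[i] >= max:
--             extra.append(numberslist[i])
--     return len(extra) - 2
-- ===== SOURCE B (Python) =====
-- def countRange(max, min, numberslist):
--     # Complement count: an element is kept iff it is NOT strictly between min and max,
--     # so no sort and no intermediate list are needed.
--     inside = sum(1 for x in numberslist if min < x < max)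
--     return len(numberslist) - inside - 2
-- ===== Notes on version B (the rewrite author's own statement) =====
-- stated objective: faster
-- what changed: Replaces sort + indexed scan building a list of kept elements by a single unsorted pass counting the complement (elements strictly between min and max) and subtracting from the length.
import Mathlib
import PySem

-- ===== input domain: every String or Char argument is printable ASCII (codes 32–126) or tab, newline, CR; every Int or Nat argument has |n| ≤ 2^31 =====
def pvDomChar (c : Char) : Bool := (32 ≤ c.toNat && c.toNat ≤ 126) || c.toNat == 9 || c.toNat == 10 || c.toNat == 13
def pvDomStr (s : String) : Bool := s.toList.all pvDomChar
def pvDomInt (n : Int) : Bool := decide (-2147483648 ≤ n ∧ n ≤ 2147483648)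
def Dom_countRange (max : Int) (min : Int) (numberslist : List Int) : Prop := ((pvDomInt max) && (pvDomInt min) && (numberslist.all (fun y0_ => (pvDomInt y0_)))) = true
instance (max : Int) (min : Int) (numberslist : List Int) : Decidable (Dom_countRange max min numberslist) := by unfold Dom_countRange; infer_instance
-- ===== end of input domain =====

-- B counts the complement in one unsorted pass instead of sorting and collecting kept elements (faster).

-- ===== PORT A =====
def countRange (max : Int) (min : Int) (numberslist : List Int) : Int :=
  let s := PySem.List.sorted numberslist (fun x => x) false
  let extra := (PySem.List.pyRange 0 (s.length : Int) 1).foldl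
    (fun extra i =>
      let v := PySem.List.pyGetD s i 0
      if v ≤ min then extra ++ [v]
      else if v ≥ max then extra ++ [v]
      else extra) []
  (extra.length : Int) - 2

-- ===== PORT B =====
def countRange_alt (max : Int) (min : Int) (numberslist : List Int) : Int :=
  let inside : Int := (numberslist.countP (fun x => min < x && x < max) : Int)
  (numberslist.length : Int) - inside - 2

-- ===== PRECONDITION & SPEC =====
def Spec_countRange (max : Int) (min : Int) (numberslist : List Int) (out : Int) : Prop := out = countRange_alt max min numberslist
instance (max : Int) (min : Int) (numberslist : List Int) (out : Int) : Decidable (Spec_countRange max min numberslist out) := by unfold Spec_countRange; infer_instance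

-- ===== CLAIM (what is proved, stated in full; the proofs are below) =====
def Claim_equal_countRange : Prop := ∀ (max : Int) (min : Int) (numberslist : List Int), Dom_countRange max min numberslist → Spec_countRange max min numberslist (countRange max min numberslist)

-- ===== LEMMAS AND PROOFS =====

-- length of A's collecting fold = count of kept elements
theorem pv_foldl_len (max min : Int) (xs : List Int) (acc : List Int) :
    (xs.foldl (fun extra v =>
      if v ≤ min then extra ++ [v]
      else if v ≥ max then extra ++ [v]
      else extra) acc).length
    = acc.length + xs.countP (fun v => decide (v ≤ min) || decide (v ≥ max)) := by
  induction xs generalizing acc with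
  | nil => simp
  | cons h t ih =>
    simp only [List.foldl_cons, List.countP_cons]
    by_cases h1 : h ≤ min
    · simp [h1, ih]
      omega
    · by_cases h2 : h ≥ max
      · simp [h1, h2, ih]
        omega
      · simp [h1, h2, ih]

theorem pv_count_split (min max : Int) (l : List Int) :
    l.countP (fun v => decide (v ≤ min) || decide (v ≥ max))
      + l.countP (fun x => min < x && x < max) = l.length := by
  induction l with
  | nil => simp
  | cons h t ih =>
    simp only [List.countP_cons, List.length_cons]
    simp only [ge_iff_le] at ih
    by_cases h1 : h ≤ min
    · have hn : ¬ (min < h ∧ h < max) := by omega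
      simp [h1, hn]
      omega
    · by_cases h2 : h ≥ max
      · have hn : ¬ (min < h ∧ h < max) := by omega
        simp [h1, h2, hn]
        omega
      · have hn : min < h ∧ h < max := by omega
        simp [h1, h2, hn.1, hn.2]
        omega

-- ===== VERDICT (by name: the statement is the Claim_ definition above) =====
theorem countRange_spec : Claim_equal_countRange := by
  intro max min l _
  unfold Spec_countRange countRange countRange_alt
  simp only []
  rw [PySem.List.foldl_pyRange_zero_pyGetD' (PySem.List.sorted l (fun x => x) false) 0
    (fun extra v =>
      if v ≤ min then extra ++ [v]
      else if v ≥ max then extra ++ [v]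
      else extra) []]
  rw [pv_foldl_len]
  have hperm := PySem.List.sorted_perm l (fun x => x) false
  have h1 := hperm.countP_eq (fun v => decide (v ≤ min) || decide (v ≥ max))
  have h2 := hperm.countP_eq (fun x => decide (min < x) && decide (x < max))
  have h3 := hperm.length_eq
  have h4 := pv_count_split min max l
  simp only [ge_iff_le] at h1 h4 ⊢
  simp only [List.length_nil, Nat.zero_add]
  omega
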